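-- pv_equiv track=rewrite | github.com/Harryalerta/CantStop | DontStop/modulos/calculadorProbabilidade.py | proximo_do_arranjo
-- ===== SOURCE A (Python) =====
-- def proximo_do_arranjo(sequencia:list)-> list:
--     if min(sequencia) != 6:
--         if sequencia[0] < 6:
--             sequencia[0] += 1
--         else:
--             sequencia[0] = 1
--             sequencia[1:len(sequencia)]  = proximo_do_arranjo(sequencia[1:len(sequencia)])
--     return sequencia
-- ===== SOURCE B (Python) =====
-- def proximo_do_arranjo(sequencia: list) -> list:
--     # Single pass: find the first entry < 6, reset everything before it to 1,
--     # increment it; if no entry is < 6, the arrangement is exhausted -> unchanged.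
--     k = 0
--     n = len(sequencia)
--     while k < n and sequencia[k] >= 6:
--         k += 1
--     if k < n:
--         sequencia[:k] = [1] * k
--         sequencia[k] += 1
--     return sequencia
-- ===== Notes on version B (the rewrite author's own statement) =====
-- stated objective: faster
-- what changed: Replaced the recursion that recomputes min() of every suffix (and rebuilds tails via slicing) with a single left-to-right scan that finds the first entry < 6, resets the prefix to 1 and increments that entry.
-- outside the precondition, e.g. on proximo_do_arranjo([]): A raises ValueError, B returns []; on proximo_do_arranjo([7]): A raises ValueError, B returns [7]
import Mathlib
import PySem

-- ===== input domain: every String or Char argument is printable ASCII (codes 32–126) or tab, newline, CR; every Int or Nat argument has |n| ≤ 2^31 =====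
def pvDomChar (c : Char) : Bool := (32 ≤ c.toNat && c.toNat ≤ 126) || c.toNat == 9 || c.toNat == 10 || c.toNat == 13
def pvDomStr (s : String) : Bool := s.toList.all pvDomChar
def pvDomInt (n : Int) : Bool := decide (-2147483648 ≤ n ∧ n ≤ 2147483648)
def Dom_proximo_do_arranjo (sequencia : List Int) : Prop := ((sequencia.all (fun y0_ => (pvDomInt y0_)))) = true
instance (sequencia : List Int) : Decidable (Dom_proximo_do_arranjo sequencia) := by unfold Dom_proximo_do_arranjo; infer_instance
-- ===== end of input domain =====

-- B replaces A's recursion (which recomputes min() of every suffix) by one single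
-- left-to-right pass; objective: faster (O(n) vs O(n^2) on long >=6 prefixes).
-- Both A and B mutate `sequencia` in place in Python; on every input admitted by
-- Pre_ the in-place effect and the return value coincide, and the theorems here
-- are about the return value.

-- ===== PORT A =====
-- literal transliteration of A; on the paths where Python raises
-- (min([]) : ValueError — the empty list is reached iff every element is > 6)
-- the port returns the list unchanged; those inputs are excluded by Pre_.
def proximo_do_arranjo : List Int → List Int
  | [] => []                                   -- Python: min([]) raises ValueError
  | x :: rest =>
    if PySem.List.min? (x :: rest) (fun y => y) ≠ some 6 then
      if x < 6 then (x + 1) :: rest            -- sequencia[0] += 1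
      else 1 :: proximo_do_arranjo rest        -- sequencia[0] = 1; seq[1:] = rec(seq[1:])
    else x :: rest

-- ===== PORT B =====
-- the while loop of Source B: index of the first element < 6 (= length if none)
def pvFindLt6 : List Int → Nat
  | [] => 0
  | x :: rest => if x ≥ 6 then pvFindLt6 rest + 1 else 0

def proximo_do_arranjo_alt (sequencia : List Int) : List Int :=
  let k := pvFindLt6 sequencia
  if k < sequencia.length then
    List.replicate k 1 ++                      -- sequencia[:k] = [1] * k
      (match sequencia.drop k with             -- sequencia[k] += 1
       | [] => []
       | x :: rest => (x + 1) :: rest)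
  else sequencia

-- ===== PRECONDITION & SPEC =====
-- Pre_ excludes exactly the inputs where Python A raises (ValueError from min([])):
-- the empty list and lists in which every element exceeds 6.
def Pre_proximo_do_arranjo (sequencia : List Int) : Prop := ∃ x ∈ sequencia, x ≤ 6
instance (sequencia : List Int) : Decidable (Pre_proximo_do_arranjo sequencia) := by
  unfold Pre_proximo_do_arranjo; infer_instance

def pvWitness_proximo_do_arranjo : List Int := [6, 2, 6]

def Spec_proximo_do_arranjo (sequencia : List Int) (out : List Int) : Prop :=
  out = proximo_do_arranjo_alt sequencia
instance (sequencia : List Int) (out : List Int) : Decidable (Spec_proximo_do_arranjo sequencia out) := by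
  unfold Spec_proximo_do_arranjo; infer_instance

-- ===== CLAIM =====
def Claim_equal_proximo_do_arranjo : Prop :=
  ∀ (sequencia : List Int), Dom_proximo_do_arranjo sequencia →
    Pre_proximo_do_arranjo sequencia →
    Spec_proximo_do_arranjo sequencia (proximo_do_arranjo sequencia)

-- ===== LEMMAS AND PROOFS =====
theorem pvFindLt6_eq_length {l : List Int} (h : ∀ x ∈ l, 6 ≤ x) :
    pvFindLt6 l = l.length := by
  induction l with
  | nil => rfl
  | cons x rest ih =>
    have hx : 6 ≤ x := h x (by simp)
    simp [pvFindLt6, hx, ih (fun y hy => h y (by simp [hy]))]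

theorem pvFindLt6_lt_length {l : List Int} (h : ∃ x ∈ l, x < 6) :
    pvFindLt6 l < l.length := by
  induction l with
  | nil => simp at h
  | cons x rest ih =>
    by_cases hx : 6 ≤ x
    · have : ∃ y ∈ rest, y < 6 := by
        obtain ⟨w, hw, hw6⟩ := h
        rcases List.mem_cons.mp hw with hw | hw
        · omega
        · exact ⟨w, hw, hw6⟩
      simpa [pvFindLt6, hx] using ih this
    · simp [pvFindLt6, hx]

theorem alt_cons_ge {x : Int} {rest : List Int} (hx : 6 ≤ x)
    (hr : pvFindLt6 rest < rest.length) :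
    proximo_do_arranjo_alt (x :: rest) = 1 :: proximo_do_arranjo_alt rest := by
  simp only [proximo_do_arranjo_alt, pvFindLt6, hx, if_pos, List.length_cons]
  rw [if_pos (by omega), if_pos hr]
  simp [List.replicate_succ]

theorem proximo_do_arranjo_spec : Claim_equal_proximo_do_arranjo := by
  unfold Claim_equal_proximo_do_arranjo
  intro sequencia _ hpre
  unfold Spec_proximo_do_arranjo
  clear ‹Dom_proximo_do_arranjo sequencia›
  induction sequencia with
  | nil => simp [Pre_proximo_do_arranjo] at hpre
  | cons x rest ih =>
    obtain ⟨w, hw, hw6⟩ := hpre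
    cases hmin : PySem.List.min? (x :: rest) (fun y => y) with
    | none => simp [PySem.List.min?_eq_none_iff] at hmin
    | some m =>
      have hmem : m ∈ x :: rest := PySem.List.min?_mem hmin
      have hisMin : ∀ y ∈ x :: rest, m ≤ y := fun y hy => PySem.List.min?_isMin hmin y hy
      by_cases hm6 : m = 6
      · -- min = 6 : A returns unchanged; every element ≥ 6 so B does too
        have hall : ∀ y ∈ x :: rest, 6 ≤ y := fun y hy => hm6 ▸ hisMin y hy
        have hk := pvFindLt6_eq_length hall
        simp [proximo_do_arranjo, hmin, hm6, proximo_do_arranjo_alt, hk]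
      · have hmlt : m < 6 := lt_of_le_of_ne (le_trans (hisMin w hw) hw6) hm6
        by_cases hx : x < 6
        · -- increment the head
          have hk0 : pvFindLt6 (x :: rest) = 0 := by simp [pvFindLt6]; omega
          simp [proximo_do_arranjo, hmin, hm6, hx, proximo_do_arranjo_alt, hk0]
        · -- head ≥ 6 : reset to 1 and recurse / skip
          have hx6 : 6 ≤ x := by omega
          have hmrest : m ∈ rest := by
            rcases List.mem_cons.mp hmem with h | h
            · omega
            · exact h
          have hprer : Pre_proximo_do_arranjo rest := ⟨m, hmrest, by omega⟩
          have hr : pvFindLt6 rest < rest.length :=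
            pvFindLt6_lt_length ⟨m, hmrest, hmlt⟩
          rw [alt_cons_ge hx6 hr]
          simp [proximo_do_arranjo, hmin, hm6, hx, ih hprer]

-- ===== VERDICT =====
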